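-- pv_equiv track=rewrite | github.com/aaditeshwar/gdelt-wildlife | scripts/gdelt-get-full-text.py | _split_into_n_chunks
-- ===== SOURCE A (Python) =====
-- def _split_into_n_chunks(lst: list, n: int) -> list[list]:
--     """Split lst into up to n non-empty contiguous chunks (roughly equal size)."""
--     if not lst or n <= 1:
--         return [lst] if lst else []
--     k = len(lst)
--     base, rem = divmod(k, n)
--     out: list[list] = []
--     i = 0
--     for j in range(n):
--         size = base + (1 if j < rem else 0)
--         if size:
--             out.append(lst[i : i + size])
--             i += size
--     return out
-- ===== SOURCE B (Python) =====
-- def _split_into_n_chunks(lst: list, n: int) -> list[list]: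
--     """Split lst into up to n non-empty contiguous chunks (roughly equal size)."""
--     if not lst or n <= 1:
--         return [lst] if lst else []
--     out: list[list] = []
--     start = 0
--     remaining = len(lst)
--     chunks_left = n
--     while remaining and chunks_left > 1:
--         size = -(-remaining // chunks_left)  # greedy: ceil of what is left per chunk still to make
--         out.append(lst[start : start + size])
--         start += size
--         remaining -= size
--         chunks_left -= 1
--     if remaining:
--         out.append(lst[start:])
--     return out
-- ===== Notes on version B (the rewrite author's own statement) =====
-- stated objective: alternative
-- what changed: Replaces A's precomputed divmod(base, rem) size schedule with a greedy while-loop that repeatedly peels a chunk of size ceil(remaining/chunks_left) from the front, recomputing the size adaptively as the list and the chunk budget shrink; the trailing remainder is appended as the last chunk.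
import Mathlib
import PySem

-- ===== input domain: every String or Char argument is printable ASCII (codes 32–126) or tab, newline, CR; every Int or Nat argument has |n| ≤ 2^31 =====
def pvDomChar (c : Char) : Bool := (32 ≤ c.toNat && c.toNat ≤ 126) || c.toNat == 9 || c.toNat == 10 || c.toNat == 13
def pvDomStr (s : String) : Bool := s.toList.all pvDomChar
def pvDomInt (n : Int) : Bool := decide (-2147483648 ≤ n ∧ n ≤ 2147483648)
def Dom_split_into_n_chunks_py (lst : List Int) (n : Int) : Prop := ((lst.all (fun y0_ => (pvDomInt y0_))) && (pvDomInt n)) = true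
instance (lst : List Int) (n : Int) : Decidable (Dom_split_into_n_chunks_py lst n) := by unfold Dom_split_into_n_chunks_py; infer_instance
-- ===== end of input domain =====

-- B replaces A's precomputed divmod size schedule with a greedy loop that peels ceil(remaining/chunks_left) each step (alternative decomposition, same cost).

-- ===== PORT A =====
def split_into_n_chunks_py (lst : List Int) (n : Int) : List (List Int) :=
  if lst = [] ∨ n ≤ 1 then (if lst = [] then [] else [lst])
  else
    let k : Int := lst.length
    let base := PySem.Int.floordiv k n
    let rem := PySem.Int.mod k n
    ((PySem.List.pyRange 0 n 1).foldl
      (fun (st : List (List Int) × Int) j =>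
        let size := base + (if j < rem then (1:Int) else 0)
        if size ≠ 0 then
          (st.1 ++ [PySem.List.slice lst (some st.2) (some (st.2 + size))], st.2 + size)
        else st)
      ([], 0)).1

-- ===== PORT B =====
-- the while loop of Source B: state (out, start, remaining, chunks_left); terminates since chunks_left decreases
def pvGreedyLoop (lst : List Int) (out : List (List Int)) (start remaining chunks_left : Int) :
    List (List Int) :=
  if h : remaining ≠ 0 ∧ 1 < chunks_left then
    let size := -(PySem.Int.floordiv (-remaining) chunks_left)
    pvGreedyLoop lst (out ++ [PySem.List.slice lst (some start) (some (start + size))])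
      (start + size) (remaining - size) (chunks_left - 1)
  else if remaining ≠ 0 then out ++ [PySem.List.slice lst (some start) none]
  else out
termination_by chunks_left.toNat
decreasing_by omega

def split_into_n_chunks_py_alt (lst : List Int) (n : Int) : List (List Int) :=
  if lst = [] ∨ n ≤ 1 then (if lst = [] then [] else [lst])
  else pvGreedyLoop lst [] 0 (lst.length : Int) n

-- ===== PRECONDITION & SPEC =====
def Spec_split_into_n_chunks_py (lst : List Int) (n : Int) (out : List (List Int)) : Prop :=
  out = split_into_n_chunks_py_alt lst n
instance (lst : List Int) (n : Int) (out : List (List Int)) :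
    Decidable (Spec_split_into_n_chunks_py lst n out) := by
  unfold Spec_split_into_n_chunks_py; infer_instance

-- ===== CLAIM =====
def Claim_equal_split_into_n_chunks_py : Prop :=
  ∀ (lst : List Int) (n : Int), Dom_split_into_n_chunks_py lst n →
    Spec_split_into_n_chunks_py lst n (split_into_n_chunks_py lst n)

-- ===== LEMMAS AND PROOFS =====

-- slices of lst taken at the running offset `start`, skipping size-0 entries (A's `if size:`)
def pvChunksOf (lst : List Int) (start : Int) : List Int → List (List Int)
  | [] => []
  | s :: ss =>
    if s ≠ 0 then PySem.List.slice lst (some start) (some (start + s)) :: pvChunksOf lst (start + s) ss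
    else pvChunksOf lst (start + s) ss

-- A's size schedule for (k, m): rem copies of base+1 then m-rem copies of base
def pvSched (base : Int) (r m : Nat) : List Int :=
  List.replicate r (base + 1) ++ List.replicate (m - r) base

lemma pvChunksOf_sched_zero (lst : List Int) (start : Int) (m : Nat) :
    pvChunksOf lst start (List.replicate m 0) = [] := by
  induction m generalizing start with
  | zero => simp [pvChunksOf]
  | succ m ih => simp [List.replicate_succ, pvChunksOf, ih]

-- A's foldl body, run over any explicit list of indices, appends pvChunksOf and sums the sizes
lemma pv_foldA_eq (lst : List Int) (rem base : Int) :
    ∀ (js : List Int) (out : List (List Int)) (i : Int),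
    js.foldl
      (fun (st : List (List Int) × Int) j =>
        if (base + (if j < rem then (1:Int) else 0)) ≠ 0 then
          (st.1 ++ [PySem.List.slice lst (some st.2)
              (some (st.2 + (base + (if j < rem then (1:Int) else 0))))],
            st.2 + (base + (if j < rem then (1:Int) else 0)))
        else st)
      (out, i)
    = (out ++ pvChunksOf lst i (js.map (fun j => base + (if j < rem then (1:Int) else 0))),
       i + (js.map (fun j => base + (if j < rem then (1:Int) else 0))).sum)
  | [], out, i => by simp [pvChunksOf]
  | j :: js, out, i => by
    simp only [List.foldl_cons, List.map_cons, List.sum_cons]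
    by_cases h : base + (if j < rem then (1:Int) else 0) ≠ 0
    · rw [if_pos h, pv_foldA_eq lst rem base js]
      simp only [pvChunksOf, if_pos h]
      rw [Prod.mk.injEq]
      exact ⟨by simp, by ring⟩
    · rw [if_neg h, pv_foldA_eq lst rem base js]
      rw [not_not] at h
      simp only [pvChunksOf]
      rw [if_neg (by simpa using h)]
      rw [Prod.mk.injEq]
      exact ⟨by rw [h]; simp, by rw [h]; ring⟩

-- the map of A's per-index size over range m is the schedule list
lemma pv_map_range_sched (base rem : Int) (m : Nat) (hr0 : 0 ≤ rem) (hrm : rem ≤ (m : Int)) :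
    ((List.range m).map (fun j : Nat => base + (if (j : Int) < rem then (1:Int) else 0)))
    = pvSched base rem.toNat m := by
  induction m with
  | zero => simp [pvSched]; omega
  | succ m ih =>
    by_cases h : rem ≤ (m : Int)
    · rw [List.range_succ, List.map_append, ih h]
      have hlt : ¬ ((m : Int) < rem) := by omega
      simp only [List.map_cons, List.map_nil, if_neg hlt]
      unfold pvSched
      have h1 : m + 1 - rem.toNat = (m - rem.toNat) + 1 := by omega
      rw [h1, List.replicate_succ']
      simp
    · -- rem = m + 1 exactly? rem ≤ m+1 and rem > m so rem = m+1
      have hrm1 : rem = (m : Int) + 1 := by omega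
      have : ∀ j ∈ List.range (m+1), base + (if (j : Int) < rem then (1:Int) else 0) = base + 1 := by
        intro j hj
        rw [List.mem_range] at hj
        rw [if_pos (by omega)]
      rw [List.map_congr_left this]
      unfold pvSched
      have : rem.toNat = m + 1 := by omega
      rw [this]
      simp [List.map_const']

-- the greedy loop with accumulator `out` prepends `out`
lemma pvGreedyLoop_eq_go (lst : List Int) :
    ∀ (cl : Int) (out : List (List Int)) (start remaining : Int),
    pvGreedyLoop lst out start remaining cl = out ++ pvGreedyLoop lst [] start remaining cl := by
  intro cl
  induction hcl : cl.toNat using Nat.strong_induction_on generalizing cl with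
  | _ N ih =>
    intro out start remaining
    conv_lhs => rw [pvGreedyLoop]
    conv_rhs => rw [pvGreedyLoop]
    by_cases h : remaining ≠ 0 ∧ 1 < cl
    · rw [dif_pos h, dif_pos h]
      have hlt : (cl - 1).toNat < N := by omega
      rw [ih (cl-1).toNat (by omega) (cl-1) rfl, ih (cl-1).toNat (by omega) (cl-1) rfl ([] ++ _)]
      simp
    · rw [dif_neg h, dif_neg h]
      by_cases h2 : remaining ≠ 0 <;> simp [h2]

-- uniqueness of floor division with positive divisor
lemma pv_divmod_unique (a m b r : Int) (hm : 0 < m) (hr : 0 ≤ r) (hrm : r < m)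
    (he : a = b * m + r) : PySem.Int.floordiv a m = b ∧ PySem.Int.mod a m = r := by
  have h1 : PySem.Int.floordiv a m = b := by
    rw [PySem.Int.floordiv_eq_iff_of_pos hm]
    constructor <;> nlinarith
  refine ⟨h1, ?_⟩
  have h2 := PySem.Int.floordiv_mul_add_mod a m
  rw [h1] at h2
  linarith

-- divmod characterisation: with 0 < m, k = base*m + rem, 0 ≤ rem < m
lemma pv_divmod_spec (k m : Int) (hm : 0 < m) :
    PySem.Int.floordiv k m * m + PySem.Int.mod k m = k ∧
    0 ≤ PySem.Int.mod k m ∧ PySem.Int.mod k m < m :=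
  ⟨PySem.Int.floordiv_mul_add_mod k m,
   PySem.Int.mod_nonneg k hm, PySem.Int.mod_lt k hm⟩

-- ceiling division: -((-k) // m) = base + (1 if rem > 0 else 0)
lemma pv_ceil_eq (k m : Int) (hm : 0 < m) :
    -(PySem.Int.floordiv (-k) m)
      = PySem.Int.floordiv k m + (if 0 < PySem.Int.mod k m then 1 else 0) := by
  obtain ⟨heq, hr0, hrm⟩ := pv_divmod_spec k m hm
  rw [PySem.Int.neg_floordiv_neg_eq_iff_of_pos hm]
  split_ifs with h
  · constructor <;> nlinarith
  · constructor <;> nlinarith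

-- MAIN: the greedy loop computes pvChunksOf of A's schedule (invariant: start + k = len)
lemma pv_greedy_eq_sched (lst : List Int) :
    ∀ (m : Nat) (start k : Int), 0 ≤ start → start + k = (lst.length : Int) → 0 ≤ k →
    0 < (m : Int) →
    pvGreedyLoop lst [] start k (m : Int)
      = pvChunksOf lst start
          (pvSched (PySem.Int.floordiv k m) (PySem.Int.mod k m).toNat m) := by
  intro m
  induction m with
  | zero => intro start k _ _ _ h; simp at h
  | succ m ih =>
    intro start k hst hlen hk _
    have hmc : ((m+1 : Nat) : Int) = (m : Int) + 1 := by push_cast; ring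
    rw [hmc]
    have hm : (0:Int) < ((m:Int) + 1) := by positivity
    obtain ⟨heq, hr0, hrm⟩ := pv_divmod_spec k ((m:Int)+1) hm
    set base := PySem.Int.floordiv k ((m:Int)+1) with hbase
    set rem := PySem.Int.mod k ((m:Int)+1) with hrem
    rw [pvGreedyLoop]
    by_cases hk0 : k = 0
    · -- empty remainder: loop stops; schedule is all zeros (base = 0, rem = 0)
      have hb0 : base = 0 := by nlinarith
      have hr00 : rem = 0 := by nlinarith
      rw [dif_neg (by simp [hk0])]
      rw [if_neg (by simp [hk0])]
      rw [hb0, hr00]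
      simp [pvSched, pvChunksOf_sched_zero]
    · by_cases hm1 : m = 0
      · -- chunks_left = 1: tail chunk lst[start:]; A's schedule is the single size k
        subst hm1
        rw [dif_neg (show ¬(k ≠ 0 ∧ 1 < ((0:Nat):Int) + 1) by norm_num)]
        rw [if_pos (by simpa using hk0)]
        have hr00 : rem = 0 := by norm_num at hrm; omega
        have hb : base = k := by norm_num at heq; omega
        rw [hb, hr00]
        simp only [Int.toNat_zero, pvSched, List.replicate_zero, List.nil_append,
          Nat.sub_zero, Nat.zero_add, List.replicate_one, pvChunksOf]
        rw [if_pos (by omega)]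
        rw [PySem.List.slice_from lst hst]
        rw [PySem.List.slice_toNat lst hst (show (0:Int) ≤ start + k by omega)]
        rw [List.take_of_length_le (by simp; omega)]
      · -- chunks_left ≥ 2: peel size = ceil, recurse with m
        have hcond : k ≠ 0 ∧ 1 < ((m:Int) + 1) := ⟨hk0, by omega⟩
        rw [dif_pos hcond]
        have hceil := pv_ceil_eq k ((m:Int)+1) hm
        rw [← hbase, ← hrem] at hceil
        set size := -(PySem.Int.floordiv (-k) ((m:Int)+1)) with hsize
        have hmpos : (0:Int) < (m:Int) := by omega
        have hb0 : 0 ≤ base := by nlinarith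
        have hsz0 : 0 ≤ size := by rw [hceil]; split_ifs <;> omega
        -- divmod of the new remainder k - size by m
        have hnew : PySem.Int.floordiv (k - size) m = base ∧
            PySem.Int.mod (k - size) m = (if 0 < rem then rem - 1 else 0) := by
          split_ifs with h
          · exact pv_divmod_unique (k - size) m base (rem - 1) hmpos (by omega) (by omega)
              (by rw [hceil, if_pos h]; nlinarith)
          · exact pv_divmod_unique (k - size) m base 0 hmpos le_rfl hmpos
              (by rw [hceil, if_neg h]; have hz : rem = 0 := by omega
                  nlinarith)
        have hknew : 0 ≤ k - size := by
          rw [hceil]; split_ifs with h <;> nlinarith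
        have hrec := ih (start + size) (k - size) (by omega) (by omega) hknew hmpos
        rw [show ((m:Int) + 1 - 1) = (m:Int) by ring]
        rw [pvGreedyLoop_eq_go, hrec, hnew.1, hnew.2]
        -- now show cons of first slice matches pvChunksOf of the full schedule
        by_cases h : 0 < rem
        · rw [if_pos h]
          have hsz : size = base + 1 := by rw [hceil, if_pos h]
          have hrt : rem.toNat = ((rem - 1).toNat) + 1 := by omega
          simp only [pvSched, hrt, List.replicate_succ, List.cons_append, pvChunksOf]
          rw [if_pos (by omega)]
          have hsub : m + 1 - ((rem - 1).toNat + 1) = m - (rem - 1).toNat := by omega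
          rw [hsub, hsz]
          simp
        · rw [if_neg h]
          have hr00 : rem = 0 := by omega
          have hsz : size = base := by rw [hceil, if_neg h]; ring
          have hbpos : 0 < base := by
            by_contra hc
            have h1 : base ≤ 0 := by omega
            have h2 : base * ((m:Int) + 1) ≤ 0 :=
              mul_nonpos_of_nonpos_of_nonneg h1 (by positivity)
            have hkpos : 0 < k := by omega
            linarith
          simp only [hr00, Int.toNat_zero, pvSched, List.replicate_zero, List.nil_append,
            Nat.sub_zero]
          rw [List.replicate_succ, pvChunksOf, if_pos (by omega), hsz]
          simp

-- ===== VERDICT =====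
theorem split_into_n_chunks_py_spec : Claim_equal_split_into_n_chunks_py := by
  intro lst n _
  unfold Spec_split_into_n_chunks_py
  by_cases h : lst = [] ∨ n ≤ 1
  · simp [split_into_n_chunks_py, split_into_n_chunks_py_alt, h]
  · simp only [split_into_n_chunks_py, split_into_n_chunks_py_alt, h, if_false]
    rw [not_or] at h
    obtain ⟨hlst, hn'⟩ := h
    have hn0 : 0 < n := by omega
    have hnn : n = (n.toNat : Int) := by omega
    have hr1 : PySem.List.pyRange 0 n 1 = (List.range n.toNat).map (fun k : Nat => (k : Int)) := by
      rw [PySem.List.pyRange_one]; simp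
    rw [hr1, pv_foldA_eq, List.map_map]
    simp only [Function.comp_def]
    rw [pv_map_range_sched _ _ _ (PySem.Int.mod_nonneg _ hn0)
        (by rw [← hnn]; exact le_of_lt (PySem.Int.mod_lt _ hn0))]
    rw [hnn, pv_greedy_eq_sched lst n.toNat 0 (lst.length : Int) le_rfl (by simp) (by positivity) (by omega)]
    simp only [List.nil_append, Int.toNat_natCast]
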